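-- pv_equiv track=rewrite | github.com/ysenoh/programing | codejam/2018R1A/a.py | f
-- ===== SOURCE A (Python) =====
-- def f(lines, R, C, H, V):
--     n = sum(1 if cell == '@' else 0 for line in lines for cell in line)
--     if n%((H+1)*(V+1)) > 0:
--         return 'IMPOSSIBLE'
--
--     n2 = n//((H+1)*(V+1))
--
--     numPerLine = n2*(V+1)
--
--
--
--     n3 = 0
--     matrix = [[0]*C for i in range(H+1)]
--     cnt = 0
--
--     for line in lines:
--         n3 += sum(1 if cell == '@' else 0 for cell in line)
--
--         if n3 > numPerLine:
--             return 'IMPOSSIBLE'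
--
--         for i, cell in enumerate(line):
--             if cell == '@':
--                 matrix[cnt][i] += 1
--
--         if n3 == numPerLine:
--             n3 = 0
--             cnt += 1
--
--         if cnt == R:
--             break
--
--     cnts = None
--     for i in range(C):
--         if cnts == None:
--             cnts = [0]*(H+1)
--
--         flag = True
--
--         for j in range(H+1):
--             cnts[j] += matrix[j][i]
--             if cnts[j] > n2:
--                 return 'IMPOSSIBLE'
--             elif cnts[j] < n2:
--                 flag = False
--
--         if flag:
--             cnts = None
--
--     return 'POSSIBLE'
-- ===== SOURCE B (Python) =====
-- def f(lines, R, C, H, V):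
--     pieces = (H + 1) * (V + 1)
--     rowcnt = [line.count('@') for line in lines]
--     n = sum(rowcnt)
--     if n % pieces:
--         return 'IMPOSSIBLE'
--     if n == 0:
--         return 'POSSIBLE'
--     n2 = n // pieces
--     band = n2 * (V + 1)
--
--     # horizontal phase: absolute cumulative row counts plus floor division,
--     # no reset counter: the line starting after cum chips belongs to band cum//band
--     grid = [[0] * C for _ in range(H + 1)]
--     cum = 0
--     for rc, line in zip(rowcnt, lines):
--         if cum + rc > (cum // band + 1) * band:
--             return 'IMPOSSIBLE'
--         for i, ch in enumerate(line):
--             if ch == '@':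
--                 grid[cum // band][i] += 1
--         cum += rc
--         if cum // band == R:
--             break
--
--     # vertical phase: 2D prefix-sum table P[j][i] = chips of band j in columns 0..i,
--     # then a stateless per-column arithmetic check: with k cuts made so far the
--     # sweep fails exactly when some band exceeds (k+1)*n2, and the number of cuts
--     # after column i is min_j P[j][i] // n2
--     P = []
--     for row in grid:
--         acc, pref = 0, []
--         for x in row:
--             acc += x
--             pref.append(acc)
--         P.append(pref)
--
--     k = 0
--     for i in range(C):
--         if any(pref[i] > (k + 1) * n2 for pref in P):
--             return 'IMPOSSIBLE'
--         k = min(pref[i] // n2 for pref in P)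
--     return 'POSSIBLE'
-- ===== Notes on version B (the rewrite author's own statement) =====
-- stated objective: faster
-- what changed: A tracks a reset-to-zero per-band chip counter with an incrementing band index and sweeps columns with a mutable None-sentinel counter list that resets on every full cut; B instead keeps one absolute cumulative chip count and derives the band index by floor division, then builds a 2D prefix-sum table and decides each column statelessly from the closed form cuts-so-far = min_j P[j][i] // n2.
-- outside the precondition, e.g. on f(['@@'], 1, 2, -2, 0): A returns 'IMPOSSIBLE', B returns 'IMPOSSIBLE'; on f(['@'], 1, 1, -1, 0): A raises ZeroDivisionError, B raises ZeroDivisionError; on f(['@'], 1, 0, 0, 0): A raises IndexError, B raises IndexError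
import Mathlib
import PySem

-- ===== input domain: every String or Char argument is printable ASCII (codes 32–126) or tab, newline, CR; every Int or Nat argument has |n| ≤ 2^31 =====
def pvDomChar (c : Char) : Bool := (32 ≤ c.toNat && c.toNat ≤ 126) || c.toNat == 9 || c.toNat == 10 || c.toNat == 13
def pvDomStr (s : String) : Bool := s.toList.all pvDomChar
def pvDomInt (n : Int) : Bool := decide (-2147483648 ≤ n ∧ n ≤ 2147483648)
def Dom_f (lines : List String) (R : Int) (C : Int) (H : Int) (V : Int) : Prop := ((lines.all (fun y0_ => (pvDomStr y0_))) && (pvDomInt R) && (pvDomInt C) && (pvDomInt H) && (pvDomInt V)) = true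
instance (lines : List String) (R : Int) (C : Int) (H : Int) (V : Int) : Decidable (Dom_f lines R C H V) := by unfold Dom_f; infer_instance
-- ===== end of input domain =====

-- B replaces A's reset-counter band loop and stateful column sweep by absolute
-- cumulative counts with floor division and a stateless prefix-sum table check;
-- its early n = 0 exit skips the (H+1)*C matrix work A always performs there
-- (measured faster in a timing run; objective: faster).

-- ===== PORT A =====
-- 'for i, cell in enumerate(line): if cell == '@': matrix[cnt][i] += 1'
-- (List.modify is a no-op out of range; Python would raise IndexError there,
--  which is unreachable under Pre_f.  Source B contains the identical inner
--  statement 'grid[cum // band][i] += 1', so the B port reuses this helper.)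
def pvWrite (matrix : List (List Int)) (cnt : Nat) (cs : List Char) : List (List Int) :=
  (cs.zipIdx).foldl
    (fun m p => if p.1 = '@' then m.modify cnt (fun row => row.modify p.2 (· + 1)) else m)
    matrix

-- the first 'for line in lines' loop of A; none = the 'return IMPOSSIBLE' inside it;
-- cnt stays ≥ 0 throughout (starts at 0, only incremented), so cnt.toNat is exact
def pvLoop1 (numPerLine R : Int) :
    List String → Int → List (List Int) → Int → Option (List (List Int))
  | [], _, matrix, _ => some matrix
  | line :: rest, n3, matrix, cnt =>
    let n3' := line.toList.foldl (fun a c => a + (if c = '@' then (1 : Int) else 0)) n3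
    if numPerLine < n3' then none
    else
      let matrix' := pvWrite matrix cnt.toNat line.toList
      let n3'' := if n3' = numPerLine then (0 : Int) else n3'
      let cnt' := if n3' = numPerLine then cnt + 1 else cnt
      if cnt' = R then some matrix' else pvLoop1 numPerLine R rest n3'' matrix' cnt'

-- 'for j in range(H+1): cnts[j] += matrix[j][i]; …' ; none = 'return IMPOSSIBLE'
-- (indices are in range whenever reached under Pre_f; pyGetD/pySetD are the total forms)
def pvInner (matrix : List (List Int)) (n2 i : Int) :
    List Int → List Int → Bool → Option (List Int × Bool)
  | [], cnts, flag => some (cnts, flag)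
  | j :: js, cnts, flag =>
    let v := PySem.List.pyGetD cnts j 0 + PySem.List.pyGetD (PySem.List.pyGetD matrix j []) i 0
    let cnts' := PySem.List.pySetD cnts j v
    if n2 < v then none
    else if v < n2 then pvInner matrix n2 i js cnts' false
    else pvInner matrix n2 i js cnts' flag

-- 'for i in range(C)' with the Optional cnts ('cnts = None' resets)
def pvOuter (matrix : List (List Int)) (n2 : Int) (hn : Nat) :
    List Int → Option (List Int) → String
  | [], _ => "POSSIBLE"
  | i :: is, ocnts =>
    let cnts := ocnts.getD (List.replicate hn 0)
    match pvInner matrix n2 i (PySem.List.pyRange 0 (hn : Int) 1) cnts true with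
    | none => "IMPOSSIBLE"
    | some (cnts', flag) => pvOuter matrix n2 hn is (if flag then none else some cnts')

def f (lines : List String) (R : Int) (C : Int) (H : Int) (V : Int) : String :=
  let n := lines.foldl
    (fun acc line => line.toList.foldl (fun a c => a + (if c = '@' then (1 : Int) else 0)) acc) 0
  if 0 < PySem.Int.mod n ((H + 1) * (V + 1)) then "IMPOSSIBLE"
  else
    let n2 := PySem.Int.floordiv n ((H + 1) * (V + 1))
    let numPerLine := n2 * (V + 1)
    let matrix := List.replicate (H + 1).toNat (List.replicate C.toNat (0 : Int))
    match pvLoop1 numPerLine R lines 0 matrix 0 with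
    | none => "IMPOSSIBLE"
    | some matrix' => pvOuter matrix' n2 (H + 1).toNat (PySem.List.pyRange 0 C 1) none

-- ===== PORT B =====
-- the prefix-sum row builder 'acc, pref = 0, []; for x in row: acc += x; pref.append(acc)'
def pvPrefixRow (row : List Int) : List Int :=
  (row.foldl (fun (s : Int × List Int) x => (s.1 + x, s.2 ++ [s.1 + x])) (0, [])).2

-- B's horizontal loop 'for rc, line in zip(rowcnt, lines)': absolute cumulative
-- count cum, band index cum // band, no reset; none = 'return IMPOSSIBLE'
def pvBuild (band R : Int) :
    List (Int × String) → Int → List (List Int) → Option (List (List Int))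
  | [], _, grid => some grid
  | (rc, line) :: rest, cum, grid =>
    if (PySem.Int.floordiv cum band + 1) * band < cum + rc then none
    else
      let grid' := pvWrite grid (PySem.Int.floordiv cum band).toNat line.toList
      let cum' := cum + rc
      if PySem.Int.floordiv cum' band = R then some grid' else pvBuild band R rest cum' grid'

-- B's vertical loop 'for i in range(C)' over the prefix table P, carrying only k;
-- Python's min() is over a nonempty sequence whenever H ≥ 0, so '.getD 0' is unreachable
def pvCheck (n2 : Int) (P : List (List Int)) : List Int → Int → String
  | [], _ => "POSSIBLE"
  | i :: is, k =>
    if P.any (fun pref => decide ((k + 1) * n2 < PySem.List.pyGetD pref i 0)) then "IMPOSSIBLE"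
    else pvCheck n2 P is
      ((PySem.List.min? (P.map (fun pref => PySem.Int.floordiv (PySem.List.pyGetD pref i 0) n2))
          (fun x => x)).getD 0)

def f_alt (lines : List String) (R : Int) (C : Int) (H : Int) (V : Int) : String :=
  let pieces := (H + 1) * (V + 1)
  let rowcnt := lines.map (fun line => (line.toList.countP (fun c => c == '@') : Int))
  let n := rowcnt.sum
  if PySem.Int.mod n pieces ≠ 0 then "IMPOSSIBLE"
  else if n = 0 then "POSSIBLE"
  else
    let n2 := PySem.Int.floordiv n pieces
    let band := n2 * (V + 1)
    let grid0 := List.replicate (H + 1).toNat (List.replicate C.toNat (0 : Int))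
    match pvBuild band R (rowcnt.zip lines) 0 grid0 with
    | none => "IMPOSSIBLE"
    | some grid => pvCheck n2 (grid.map pvPrefixRow) (PySem.List.pyRange 0 C 1) 0

-- ===== PRECONDITION & SPEC =====
-- Pre_f restricts to the problem's natural domain: non-negative cut counts H, V and no
-- chip '@' at a column index ≥ C.  Outside it A raises (ZeroDivisionError when H or V is
-- -1, IndexError on a chip beyond column C-1 or with H < -1) or, on the remaining
-- negative H/V inputs, returns values that are accidents of Python's floor division
-- with a negative divisor.
def Pre_f (lines : List String) (R : Int) (C : Int) (H : Int) (V : Int) : Prop :=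
  0 ≤ H ∧ 0 ≤ V ∧ ∀ line ∈ lines, '@' ∉ line.toList.drop C.toNat
instance (lines : List String) (R : Int) (C : Int) (H : Int) (V : Int) : Decidable (Pre_f lines R C H V) := by unfold Pre_f; infer_instance

def pvWitness_f : List String × Int × Int × Int × Int := (["@.", ".@"], 2, 2, 1, 1)

def Spec_f (lines : List String) (R : Int) (C : Int) (H : Int) (V : Int) (out : String) : Prop := out = f_alt lines R C H V
instance (lines : List String) (R : Int) (C : Int) (H : Int) (V : Int) (out : String) : Decidable (Spec_f lines R C H V out) := by unfold Spec_f; infer_instance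

-- ===== CLAIM (what is proved, stated in full; the proofs are below) =====
def Claim_equal_f : Prop := ∀ (lines : List String) (R : Int) (C : Int) (H : Int) (V : Int), Dom_f lines R C H V → Pre_f lines R C H V → Spec_f lines R C H V (f lines R C H V)

-- ===== LEMMAS AND PROOFS =====

theorem pv_count_fold (cs : List Char) (a : Int) :
    cs.foldl (fun a c => a + (if c = '@' then (1:Int) else 0)) a
      = a + (cs.countP (fun c => c == '@') : Int) := by
  rw [PySem.List.foldl_add]
  rw [show (fun c : Char => if c = '@' then (1:Int) else 0)
        = (fun c : Char => if (fun c : Char => c == '@') c then (1:Int) else 0) from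
      funext fun c => by simp]
  rw [PySem.List.sum_map_ite_one_zero]

theorem pv_sum_eq (lines : List String) :
    lines.foldl
      (fun acc line => line.toList.foldl (fun a c => a + (if c = '@' then (1:Int) else 0)) acc) 0
      = (lines.map (fun line => (line.toList.countP (fun c => c == '@') : Int))).sum := by
  rw [show (fun (acc : Int) (line : String) =>
        line.toList.foldl (fun a c => a + (if c = '@' then (1:Int) else 0)) acc)
      = (fun acc line => acc + (line.toList.countP (fun c => c == '@') : Int)) from
      funext fun acc => funext fun line => pv_count_fold _ _]
  rw [PySem.List.foldl_add]
  simp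


-- ---- phase 1: A's reset-counter loop tracks B's absolute cumulative count ----

theorem pv_fdiv_mod_of_bounds (band q r : Int) (hb : 0 < band) (h0 : 0 ≤ r) (hr : r < band) :
    PySem.Int.floordiv (q * band + r) band = q ∧ PySem.Int.mod (q * band + r) band = r := by
  have hfd : PySem.Int.floordiv (q * band + r) band = q := by
    rw [PySem.Int.floordiv_eq_iff_of_pos hb]
    constructor <;> nlinarith
  refine ⟨hfd, ?_⟩
  have := PySem.Int.floordiv_mul_add_mod (q * band + r) band
  rw [hfd] at this
  linarith

theorem pv_build_eq_loop1 (band R : Int) (hb : 0 < band) :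
    ∀ (ls : List String) (q r : Int) (grid : List (List Int)), 0 ≤ r → r < band →
    pvLoop1 band R ls r grid q
      = pvBuild band R (ls.map (fun l => ((l.toList.countP (fun c => c == '@') : Int), l)))
          (q * band + r) grid := by
  intro ls
  induction ls with
  | nil => intro q r grid _ _; simp [pvLoop1, pvBuild]
  | cons line rest ih =>
    intro q r grid h0 hr
    obtain ⟨hfd, _⟩ := pv_fdiv_mod_of_bounds band q r hb h0 hr
    simp only [pvLoop1, pvBuild, List.map_cons]
    rw [pv_count_fold]
    set rc : Int := (line.toList.countP (fun c => c == '@') : Int) with hrc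
    have hrc0 : 0 ≤ rc := by positivity
    have hcond : (band < r + rc) ↔ ((PySem.Int.floordiv (q * band + r) band + 1) * band < q * band + r + rc) := by
      rw [hfd]; constructor <;> intro h <;> nlinarith
    by_cases hab : band < r + rc
    · have hab2 := hcond.mp hab
      rw [if_pos hab, if_pos hab2]
    · have hab2 := (not_congr hcond).mp hab
      rw [if_neg hab, if_neg hab2]
      rw [hfd]
      by_cases hcomp : r + rc = band
      · have hcum : q * band + r + rc = (q + 1) * band + 0 := by linarith
        have hfd' : PySem.Int.floordiv (q * band + r + rc) band = q + 1 := by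
          rw [hcum]; exact (pv_fdiv_mod_of_bounds band (q+1) 0 hb le_rfl hb).1
        have hA : r + rc = band := hcomp
        simp only [if_pos hA]
        rw [hfd']
        by_cases hbr : q + 1 = R
        · rw [if_pos hbr, if_pos hbr]
        · rw [if_neg hbr, if_neg hbr, hcum, ih (q+1) 0 _ le_rfl hb]
      · have hlt : r + rc < band := by omega
        have hcum : q * band + r + rc = q * band + (r + rc) := by ring
        have hfd' : PySem.Int.floordiv (q * band + r + rc) band = q := by
          rw [hcum]; exact (pv_fdiv_mod_of_bounds band q (r+rc) hb (by linarith) hlt).1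
        simp only [if_neg hcomp]
        rw [hfd']
        by_cases hbr : q = R
        · rw [if_pos hbr, if_pos hbr]
        · rw [if_neg hbr, if_neg hbr, hcum, ih q (r+rc) _ (by linarith) hlt]

-- ---- the grid invariant: row lengths and non-negative entries ----

def GridOK (hn Cn : Nat) (m : List (List Int)) : Prop :=
  m.length = hn ∧ ∀ row ∈ m, row.length = Cn ∧ ∀ x ∈ row, 0 ≤ x

theorem pv_mem_modify {α : Type} (Q : α → Prop) (l : List α) (n : Nat) (g : α → α)
    (hl : ∀ a ∈ l, Q a) (hg : ∀ a, Q a → Q (g a)) : ∀ a ∈ l.modify n g, Q a := by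
  intro a ha
  obtain ⟨i, hi, hgi⟩ := List.getElem_of_mem ha
  rw [List.getElem_modify] at hgi
  by_cases hin : n = i
  · subst hgi
    rw [if_pos hin]
    exact hg _ (hl _ (List.getElem_mem _))
  · subst hgi
    rw [if_neg hin]
    exact hl _ (List.getElem_mem _)

theorem pv_write_ok (hn Cn : Nat) (cnt : Nat) :
    ∀ (l : List (Char × Nat)) (m : List (List Int)), GridOK hn Cn m →
    GridOK hn Cn (l.foldl
      (fun m p => if p.1 = '@' then m.modify cnt (fun row => row.modify p.2 (· + 1)) else m) m) := by
  intro l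
  induction l with
  | nil => intro m hm; exact hm
  | cons p t ih =>
    intro m hm
    simp only [List.foldl_cons]
    apply ih
    by_cases hc : p.1 = '@'
    · rw [if_pos hc]
      refine ⟨by simpa [List.length_modify] using hm.1, ?_⟩
      apply pv_mem_modify _ _ _ _ hm.2
      intro row hrow
      refine ⟨by simpa [List.length_modify] using hrow.1, ?_⟩
      apply pv_mem_modify _ _ _ _ hrow.2
      intro x hx
      linarith
    · rw [if_neg hc]; exact hm

theorem pv_build_ok (band R : Int) (hn Cn : Nat) :
    ∀ (ps : List (Int × String)) (cum : Int) (m grid : List (List Int)),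
    GridOK hn Cn m → pvBuild band R ps cum m = some grid → GridOK hn Cn grid := by
  intro ps
  induction ps with
  | nil => intro cum m grid hm h; cases h; exact hm
  | cons p t ih =>
    intro cum m grid hm h
    obtain ⟨rc, line⟩ := p
    simp only [pvBuild] at h
    by_cases hab : (PySem.Int.floordiv cum band + 1) * band < cum + rc
    · rw [if_pos hab] at h; cases h
    · rw [if_neg hab] at h
      have hok : GridOK hn Cn (pvWrite m (PySem.Int.floordiv cum band).toNat line.toList) :=
        pv_write_ok hn Cn _ _ m hm
      by_cases hbr : PySem.Int.floordiv (cum + rc) band = R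
      · rw [if_pos hbr] at h; cases h; exact hok
      · rw [if_neg hbr] at h; exact ih _ _ _ hok h


-- ---- phase 2, step (a): A's indexed Option-state sweep as a vector-state sweep ----
-- (proof-internal stepping stone between pvOuter and pvCheck)

def pvSweep (n2 : Int) (zero : List Int) : List (List Int) → List Int → String
  | [], _ => "POSSIBLE"
  | col :: cols, cnts =>
    let cnts' := (cnts.zip col).map (fun p => p.1 + p.2)
    if cnts'.any (fun c => decide (n2 < c)) then "IMPOSSIBLE"
    else pvSweep n2 zero cols (if cnts'.all (fun c => c == n2) then zero else cnts')

theorem pv_getD_append {α : Type} (l₁ l₂ : List α) (x : α) (d : α) :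
    (l₁ ++ x :: l₂).getD l₁.length d = x := by
  simp [List.getD_eq_getElem?_getD]

theorem pv_set_append {α : Type} (l₁ l₂ : List α) (x v : α) :
    (l₁ ++ x :: l₂).set l₁.length v = l₁ ++ v :: l₂ := by
  simp

theorem pv_inner_eq (n2 i : Int) (matrix₀ : List (List Int)) :
    ∀ (c2 : List Int) (m2 : List (List Int)) (c1 : List Int) (m1 : List (List Int)) (flag : Bool),
    matrix₀ = m1 ++ m2 → m1.length = c1.length → m2.length = c2.length →
    pvInner matrix₀ n2 i
        (PySem.List.pyRange (c1.length : Int) ((c1.length : Int) + (c2.length : Int)) 1)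
        (c1 ++ c2) flag
      = (if ((c2.zip (m2.map (fun row => PySem.List.pyGetD row i 0))).map (fun p => p.1 + p.2)).any
              (fun c => decide (n2 < c))
         then none
         else some
           (c1 ++ (c2.zip (m2.map (fun row => PySem.List.pyGetD row i 0))).map (fun p => p.1 + p.2),
            flag && ((c2.zip (m2.map (fun row => PySem.List.pyGetD row i 0))).map (fun p => p.1 + p.2)).all
              (fun c => !decide (c < n2)))) := by
  intro c2
  induction c2 with
  | nil =>
    intro m2 c1 m1 flag hmat _ hm2
    have hm2' : m2 = [] := List.eq_nil_of_length_eq_zero hm2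
    subst hm2'
    simp only [List.length_nil, Nat.cast_zero, add_zero, List.append_nil]
    rw [PySem.List.pyRange_one_eq_nil le_rfl]
    simp [pvInner]
  | cons x c2' ih =>
    intro m2 c1 m1 flag hmat hm1 hm2
    rcases m2 with _ | ⟨r, m2'⟩
    · simp at hm2
    · subst hmat
      rw [PySem.List.pyRange_one_cons (by push_cast [List.length_cons]; omega)]
      simp only [pvInner]
      rw [show PySem.List.pyGetD (c1 ++ x :: c2') ((c1.length : Nat) : Int) 0 = x from by
            rw [PySem.List.pyGetD_natCast]; exact pv_getD_append _ _ _ _]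
      rw [show PySem.List.pyGetD (m1 ++ r :: m2') ((c1.length : Nat) : Int) [] = r from by
            rw [PySem.List.pyGetD_natCast, ← hm1]; exact pv_getD_append _ _ _ _]
      rw [show PySem.List.pySetD (c1 ++ x :: c2') ((c1.length : Nat) : Int)
            (x + PySem.List.pyGetD r i 0) = c1 ++ (x + PySem.List.pyGetD r i 0) :: c2' from by
            rw [PySem.List.pySetD_natCast]; exact pv_set_append _ _ _ _]
      set v := x + PySem.List.pyGetD r i 0 with hv
      simp only [List.map_cons, List.zip_cons_cons, List.any_cons, List.all_cons]
      by_cases hgt : n2 < v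
      · rw [if_pos hgt, if_pos (show (decide (n2 < v) || ((c2'.zip (m2'.map (fun row => PySem.List.pyGetD row i 0))).map (fun p => p.1 + p.2)).any (fun c => decide (n2 < c))) = true from by simp [hgt])]
      · rw [if_neg hgt]
        have harg1 : ((c1.length : Int) + 1) = (((c1 ++ [v]).length : Nat) : Int) := by
          simp
        have harg2 : ((c1.length : Int) + (((x :: c2').length : Nat) : Int))
            = (((c1 ++ [v]).length : Nat) : Int) + ((c2'.length : Nat) : Int) := by
          simp; ring
        have hc : c1 ++ v :: c2' = (c1 ++ [v]) ++ c2' := by simp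
        have hm : m1 ++ r :: m2' = (m1 ++ [r]) ++ m2' := by simp
        by_cases hlt : v < n2
        · rw [if_pos hlt, harg2, harg1, hc,
            ih m2' (c1 ++ [v]) (m1 ++ [r]) false hm (by simp [hm1]) (by simpa using hm2)]
          have hd : decide (n2 < x + PySem.List.pyGetD r i 0) = false := by
            rw [← hv]; exact decide_eq_false hgt
          have hd3 : decide (x + PySem.List.pyGetD r i 0 < n2) = true := by
            rw [← hv]; exact decide_eq_true hlt
          rw [hd, hd3, Bool.false_or, ← hv]
          simp
        · rw [if_neg hlt, harg2, harg1, hc,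
            ih m2' (c1 ++ [v]) (m1 ++ [r]) flag hm (by simp [hm1]) (by simpa using hm2)]
          have hd : decide (n2 < x + PySem.List.pyGetD r i 0) = false := by
            rw [← hv]; exact decide_eq_false hgt
          have hd2 : decide (x + PySem.List.pyGetD r i 0 < n2) = false := by
            rw [← hv]; exact decide_eq_false hlt
          rw [hd, hd2, Bool.false_or, ← hv]
          simp

theorem pv_all_congr {α : Type} (l : List α) (p q : α → Bool) (h : ∀ x ∈ l, p x = q x) :
    l.all p = l.all q := by
  induction l with
  | nil => rfl
  | cons a t ih => simp [h a (by simp), ih (fun x hx => h x (by simp [hx]))]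

theorem pv_any_congr {α : Type} (l : List α) (p q : α → Bool) (h : ∀ x ∈ l, p x = q x) :
    l.any p = l.any q := by
  induction l with
  | nil => rfl
  | cons a t ih => simp [h a (by simp), ih (fun x hx => h x (by simp [hx]))]

theorem pv_outer_eq (matrix : List (List Int)) (n2 : Int) (hn : Nat)
    (hm : matrix.length = hn) :
    ∀ (is : List Int) (ocnts : Option (List Int)) (cnts : List Int),
    cnts = ocnts.getD (List.replicate hn 0) → cnts.length = hn →
    pvOuter matrix n2 hn is ocnts
      = pvSweep n2 (List.replicate hn 0)
          (is.map (fun i => matrix.map (fun row => PySem.List.pyGetD row i 0))) cnts := by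
  intro is
  induction is with
  | nil => intro ocnts cnts _ _; simp [pvOuter, pvSweep]
  | cons i is ih =>
    intro ocnts cnts hrel hlen
    simp only [pvOuter, pvSweep, List.map_cons]
    rw [← hrel]
    have hinner := pv_inner_eq n2 i matrix cnts matrix [] [] true rfl rfl (by rw [hm, hlen])
    simp only [List.nil_append, List.length_nil, Nat.cast_zero, zero_add, hlen] at hinner
    rw [hinner]
    set upd := ((cnts.zip (matrix.map (fun row => PySem.List.pyGetD row i 0))).map
      (fun p => p.1 + p.2)) with hupd
    by_cases ha : upd.any (fun c => decide (n2 < c)) = true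
    · rw [if_pos ha, if_pos ha]
    · rw [if_neg ha, if_neg ha]
      have hle : ∀ c ∈ upd, ¬ (decide (n2 < c)) = true := by
        simpa [List.any_eq_false] using ha
      have hfl : (upd.all (fun c => !decide (c < n2))) = upd.all (fun c => c == n2) := by
        apply pv_all_congr
        intro c hc
        have hle' := hle c hc
        simp at hle'
        by_cases hq : c = n2
        · simp [hq]
        · have hlt : c < n2 := by omega
          simp [hq, hlt]
      have hulen : upd.length = hn := by
        rw [hupd]
        simp [hlen, hm]
      rw [Bool.true_and, hfl]
      rw [show (match some (upd, (upd.all fun c => c == n2)) with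
          | none => "IMPOSSIBLE"
          | some (cnts', flag) => pvOuter matrix n2 hn is (if flag = true then none else some cnts'))
            = pvOuter matrix n2 hn is (if (upd.all fun c => c == n2) = true then none else some upd) from rfl]
      by_cases hfla : upd.all (fun c => c == n2) = true
      · rw [if_pos hfla, if_pos hfla]
        exact ih none _ rfl (by simp)
      · rw [if_neg hfla, if_neg hfla]
        exact ih (some upd) upd rfl hulen


-- ---- phase 2, step (b): the prefix-sum table row is the list of take-sums ----

theorem pv_prefix_aux :
    ∀ (row : List Int) (acc : Int) (pref : List Int),
    (row.foldl (fun (s : Int × List Int) x => (s.1 + x, s.2 ++ [s.1 + x])) (acc, pref)).2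
      = pref ++ (List.range row.length).map (fun t => acc + (row.take (t+1)).sum) := by
  intro row
  induction row with
  | nil => intro acc pref; simp
  | cons x xs ih =>
    intro acc pref
    simp only [List.foldl_cons, List.length_cons]
    rw [ih (acc + x) (pref ++ [acc + x])]
    rw [List.range_succ_eq_map, List.map_cons, List.map_map, List.append_assoc]
    congr 1
    simp only [List.take_succ_cons, List.sum_cons, List.singleton_append]
    congr 1
    · simp
    · apply List.map_congr_left
      intro t _
      simp
      ring

theorem pv_prefix_getD (row : List Int) (t : Nat) (ht : t < row.length) :
    (pvPrefixRow row).getD t 0 = (row.take (t+1)).sum := by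
  unfold pvPrefixRow
  rw [pv_prefix_aux, List.nil_append]
  simp [List.getD_eq_getElem?_getD, List.getElem?_map, List.getElem?_range ht]

-- ---- phase 2, step (c): the vector-state sweep is B's stateless min/floordiv check ----

theorem pv_min_getD (l : List Int) (hl : l ≠ []) (k : Int)
    (hlb : ∀ x ∈ l, k ≤ x) (hmem : ∃ x ∈ l, x = k) :
    (PySem.List.min? l (fun x => x)).getD 0 = k := by
  rcases h : PySem.List.min? l (fun x => x) with _ | m
  · exact absurd ((PySem.List.min?_eq_none_iff l (fun x => x)).mp h) hl
  · have hm : m ∈ l := PySem.List.min?_mem h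
    obtain ⟨x, hx, rfl⟩ := hmem
    have h1 : m ≤ x := PySem.List.min?_isMin h x hx
    have h2 : x ≤ m := hlb m hm
    simpa using le_antisymm h1 h2

theorem pv_sweep_eq_check (n2 : Int) (hn2 : 0 < n2) (grid : List (List Int)) (hne : grid ≠ [])
    (Cn : Nat) (hok : ∀ row ∈ grid, row.length = Cn ∧ ∀ x ∈ row, 0 ≤ x) :
    ∀ (m t : Nat) (k : Int), Cn - t = m → t ≤ Cn →
    (∀ row ∈ grid, k * n2 ≤ ((row.take t).sum : Int) ∧ ((row.take t).sum : Int) ≤ (k+1) * n2) →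
    pvSweep n2 (List.replicate grid.length 0)
        ((PySem.List.pyRange (t : Int) (Cn : Int) 1).map
          (fun i => grid.map (fun row => PySem.List.pyGetD row i 0)))
        (grid.map (fun row => (row.take t).sum - k * n2))
      = pvCheck n2 (grid.map pvPrefixRow) (PySem.List.pyRange (t : Int) (Cn : Int) 1) k := by
  intro m
  induction m with
  | zero =>
    intro t k hm ht _
    have hCt : Cn = t := by omega
    rw [PySem.List.pyRange_one_eq_nil (by exact_mod_cast hCt.le)]
    simp [pvSweep, pvCheck]
  | succ m ih =>
    intro t k hm ht hinv
    have htlt : t < Cn := by omega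
    rw [PySem.List.pyRange_one_cons (by exact_mod_cast htlt)]
    simp only [List.map_cons, pvSweep, pvCheck]
    -- the column entry of each row, and the prefix-table entry
    have hS : ∀ row ∈ grid, PySem.List.pyGetD row ((t : Nat) : Int) 0
        = (row.take (t+1)).sum - (row.take t).sum := by
      intro row hrow
      have htr : t < row.length := by rw [(hok row hrow).1]; exact htlt
      rw [PySem.List.pyGetD_natCast, List.getD_eq_getElem _ _ htr,
        List.sum_take_succ row t htr]
      ring
    have hP : ∀ row ∈ grid, PySem.List.pyGetD (pvPrefixRow row) ((t : Nat) : Int) 0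
        = (row.take (t+1)).sum := by
      intro row hrow
      have htr : t < row.length := by rw [(hok row hrow).1]; exact htlt
      rw [PySem.List.pyGetD_natCast, pv_prefix_getD row t htr]
    have hmono : ∀ row ∈ grid, ((row.take t).sum : Int) ≤ (row.take (t+1)).sum := by
      intro row hrow
      have htr : t < row.length := by rw [(hok row hrow).1]; exact htlt
      have h0 : (0 : Int) ≤ row[t] := (hok row hrow).2 _ (List.getElem_mem htr)
      rw [List.sum_take_succ row t htr]
      linarith
    -- the updated vector
    have hzip : (((grid.map (fun row => ((row.take t).sum : Int) - k * n2)).zip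
          (grid.map (fun row => PySem.List.pyGetD row ((t : Nat) : Int) 0))).map
            (fun p => p.1 + p.2))
        = grid.map (fun row => ((row.take (t+1)).sum : Int) - k * n2) := by
      rw [List.zip_map', List.map_map]
      apply List.map_congr_left
      intro row hrow
      simp only [Function.comp_apply]
      rw [hS row hrow]
      ring
    rw [hzip]
    -- the abort tests agree
    have habort : (grid.map (fun row => ((row.take (t+1)).sum : Int) - k * n2)).any
          (fun c => decide (n2 < c))
        = (grid.map pvPrefixRow).any
          (fun pref => decide ((k + 1) * n2 < PySem.List.pyGetD pref ((t : Nat) : Int) 0)) := by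
      rw [List.any_map, List.any_map]
      apply pv_any_congr
      intro row hrow
      simp only [Function.comp]
      rw [hP row hrow, decide_eq_decide]
      constructor <;> intro <;> linarith
    rw [habort]
    by_cases hab : ((grid.map pvPrefixRow).any
        (fun pref => decide ((k + 1) * n2 < PySem.List.pyGetD pref ((t : Nat) : Int) 0))) = true
    · rw [if_pos hab, if_pos hab]
    · rw [if_neg hab, if_neg hab]
      -- bounds at t+1
      have hub : ∀ row ∈ grid, ((row.take (t+1)).sum : Int) ≤ (k+1) * n2 := by
        intro row hrow
        have habF := Bool.eq_false_iff.mpr hab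
        have h1 := List.any_eq_false.mp habF _ (List.mem_map_of_mem hrow)
        rw [hP row hrow] at h1
        have h2 := of_decide_eq_false (Bool.eq_false_iff.mpr h1)
        linarith
      have hlb : ∀ row ∈ grid, k * n2 ≤ ((row.take (t+1)).sum : Int) := by
        intro row hrow
        exact le_trans (hinv row hrow).1 (hmono row hrow)
      -- the new k of pvCheck
      have hmap2 : (grid.map pvPrefixRow).map
            (fun pref => PySem.Int.floordiv (PySem.List.pyGetD pref ((t : Nat) : Int) 0) n2)
          = grid.map (fun row => PySem.Int.floordiv ((row.take (t+1)).sum) n2) := by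
        rw [List.map_map]
        apply List.map_congr_left
        intro row hrow
        simp only [Function.comp]
        rw [hP row hrow]
      rw [hmap2]
      by_cases hall : (grid.all
          (fun row => decide (((row.take (t+1)).sum : Int) = (k+1) * n2))) = true
      · -- every band is exactly full: the sweep resets, and the new k is k+1
        have halleq : ∀ row ∈ grid, ((row.take (t+1)).sum : Int) = (k+1) * n2 := by
          intro row hrow
          exact of_decide_eq_true (List.all_eq_true.mp hall row hrow)
        have hallL : ((grid.map (fun row => ((row.take (t+1)).sum : Int) - k * n2)).all
            (fun c => c == n2)) = true := by
          rw [List.all_map]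
          apply List.all_eq_true.mpr
          intro row hrow
          have := halleq row hrow
          simp only [Function.comp, beq_iff_eq]
          linarith
        rw [if_pos hallL]
        have hkc : ((PySem.List.min? (grid.map
              (fun row => PySem.Int.floordiv ((row.take (t+1)).sum) n2)) (fun x => x)).getD 0)
            = k + 1 := by
          apply pv_min_getD _ (by simpa using hne)
          · intro x hx
            obtain ⟨row, hrow, rfl⟩ := List.mem_map.mp hx
            rw [halleq row hrow]
            rw [show (k+1) * n2 = (k+1) * n2 + 0 by ring,
              (pv_fdiv_mod_of_bounds n2 (k+1) 0 hn2 le_rfl hn2).1]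
          · obtain ⟨row, hrow⟩ := List.exists_mem_of_ne_nil grid hne
            refine ⟨_, List.mem_map_of_mem hrow, ?_⟩
            rw [halleq row hrow]
            rw [show (k+1) * n2 = (k+1) * n2 + 0 by ring,
              (pv_fdiv_mod_of_bounds n2 (k+1) 0 hn2 le_rfl hn2).1]
        rw [hkc]
        have hzero : grid.map (fun row => ((row.take (t+1)).sum : Int) - (k+1) * n2)
            = List.replicate grid.length (0 : Int) := by
          have h1 : grid.map (fun row => ((row.take (t+1)).sum : Int) - (k+1) * n2)
              = grid.map (fun _ => (0:Int)) := by
            apply List.map_congr_left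
            intro row hrow
            rw [halleq row hrow]
            ring
          rw [h1, List.map_const']
        have hcast : ((t : Int) + 1) = (((t+1 : Nat)) : Int) := by push_cast; ring
        rw [hcast]
        have hIH := ih (t+1) (k+1) (by omega) (by omega) (by
          intro row hrow
          rw [halleq row hrow]
          constructor
          · linarith
          · nlinarith)
        rw [hzero] at hIH
        exact hIH
      · -- some band is short of full: no reset, and the new k is still k
        have hallL : ((grid.map (fun row => ((row.take (t+1)).sum : Int) - k * n2)).all
            (fun c => c == n2)) = false := by
          rw [List.all_map]
          apply List.all_eq_false.mpr
          have hex : ∃ row ∈ grid, ¬ (((row.take (t+1)).sum : Int) = (k+1) * n2) := by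
            obtain ⟨row, hrow, h⟩ := List.all_eq_false.mp (Bool.eq_false_iff.mpr hall)
            exact ⟨row, hrow, of_decide_eq_false (Bool.eq_false_iff.mpr h)⟩
          obtain ⟨row, hrow, hne2⟩ := hex
          refine ⟨row, hrow, ?_⟩
          simp only [Function.comp, beq_iff_eq]
          intro h
          exact hne2 (by linarith)
        rw [hallL, if_neg (by simp)]
        have hkc : ((PySem.List.min? (grid.map
              (fun row => PySem.Int.floordiv ((row.take (t+1)).sum) n2)) (fun x => x)).getD 0)
            = k := by
          apply pv_min_getD _ (by simpa using hne)
          · intro x hx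
            obtain ⟨row, hrow, rfl⟩ := List.mem_map.mp hx
            rw [PySem.Int.le_floordiv_iff_mul_le hn2]
            exact hlb row hrow
          · have hex : ∃ row ∈ grid, ¬ (((row.take (t+1)).sum : Int) = (k+1) * n2) := by
              obtain ⟨row, hrow, h⟩ := List.all_eq_false.mp (Bool.eq_false_iff.mpr hall)
              exact ⟨row, hrow, of_decide_eq_false (Bool.eq_false_iff.mpr h)⟩
            obtain ⟨row, hrow, hne2⟩ := hex
            refine ⟨_, List.mem_map_of_mem hrow, ?_⟩
            rw [PySem.Int.floordiv_eq_iff_of_pos hn2]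
            refine ⟨hlb row hrow, lt_of_le_of_ne (hub row hrow) hne2⟩
        rw [hkc]
        have hcast : ((t : Int) + 1) = (((t+1 : Nat)) : Int) := by push_cast; ring
        rw [hcast]
        apply ih (t+1) k (by omega) (by omega)
        intro row hrow
        exact ⟨hlb row hrow, hub row hrow⟩


-- ---- the n = 0 case: a grid with no chip at all is POSSIBLE on both sides ----

theorem pv_getD_zero (xs : List Int) (j : Int) (h : ∀ x ∈ xs, x = 0) :
    PySem.List.pyGetD xs j 0 = 0 := by
  by_cases hin : PySem.Raise.InRange xs.length j
  · exact h _ (PySem.List.pyGetD_mem xs 0 hin)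
  · rw [PySem.List.pyGetD_of_none]
    rwa [PySem.List.pyGet?_eq_none_iff]

theorem pv_write_id (cnt : Nat) :
    ∀ (l : List (Char × Nat)) (m : List (List Int)), (∀ p ∈ l, p.1 ≠ '@') →
    l.foldl (fun m p => if p.1 = '@' then m.modify cnt (fun row => row.modify p.2 (· + 1)) else m) m
      = m := by
  intro l
  induction l with
  | nil => intro m _; rfl
  | cons p t ih =>
    intro m h
    simp only [List.foldl_cons, if_neg (h p (by simp))]
    exact ih m (fun q hq => h q (by simp [hq]))

theorem pv_loop1_zero (R : Int) :
    ∀ (ls : List String) (grid : List (List Int)) (cnt : Int),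
    (∀ l ∈ ls, '@' ∉ l.toList) → pvLoop1 0 R ls 0 grid cnt = some grid := by
  intro ls
  induction ls with
  | nil => intro grid cnt _; rfl
  | cons line rest ih =>
    intro grid cnt h
    simp only [pvLoop1]
    rw [pv_count_fold]
    have hcnt : line.toList.countP (fun c => c == '@') = 0 := by
      rw [List.countP_eq_zero]
      intro c hc
      simp only [beq_iff_eq]
      intro hceq
      exact h line (by simp) (hceq ▸ hc)
    rw [hcnt]
    simp only [Nat.cast_zero, add_zero, lt_irrefl, if_false, if_true]
    rw [show pvWrite grid cnt.toNat line.toList = grid from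
      pv_write_id cnt.toNat _ grid (fun p hp => by
        intro hpe
        exact h line (by simp) (hpe ▸ List.fst_mem_of_mem_zipIdx hp))]
    by_cases hbr : cnt + 1 = R
    · rw [if_pos hbr]
    · rw [if_neg hbr]
      exact ih grid (cnt + 1) (fun l hl => h l (by simp [hl]))

theorem pv_inner_zero (hn Cn : Nat) (i : Int) :
    ∀ (js : List Int) (cnts : List Int) (flag : Bool),
    (∀ j ∈ js, 0 ≤ j) → (∀ x ∈ cnts, x = (0:Int)) →
    ∃ c', pvInner (List.replicate hn (List.replicate Cn 0)) 0 i js cnts flag = some (c', flag)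
      ∧ ∀ x ∈ c', x = (0:Int) := by
  intro js
  induction js with
  | nil => intro cnts flag _ hc; exact ⟨cnts, rfl, hc⟩
  | cons j js ih =>
    intro cnts flag hj hc
    simp only [pvInner]
    have h1 : PySem.List.pyGetD cnts j 0 = 0 := pv_getD_zero _ _ hc
    have hrow0 : ∀ x ∈ PySem.List.pyGetD (List.replicate hn (List.replicate Cn (0:Int))) j [], x = (0:Int) := by
      by_cases hin : PySem.Raise.InRange (List.replicate hn (List.replicate Cn (0:Int))).length j
      · intro x hx
        have hmem := PySem.List.pyGetD_mem (List.replicate hn (List.replicate Cn (0:Int))) [] hin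
        rw [List.eq_of_mem_replicate hmem] at hx
        exact List.eq_of_mem_replicate hx
      · intro x hx
        rw [PySem.List.pyGetD_of_none _ _ _ (by
            rwa [PySem.List.pyGet?_eq_none_iff])] at hx
        simp at hx
    have h2 : PySem.List.pyGetD (PySem.List.pyGetD (List.replicate hn (List.replicate Cn (0:Int))) j []) i 0 = 0 :=
      pv_getD_zero _ _ hrow0
    rw [h1, h2]
    simp only [add_zero, lt_irrefl, if_false]
    have hset : ∀ x ∈ PySem.List.pySetD cnts j (0:Int), x = (0:Int) := by
      intro x hx
      rw [PySem.List.pySetD_of_nonneg cnts 0 (hj j (by simp))] at hx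
      rcases List.mem_or_eq_of_mem_set hx with h | h
      · exact hc x h
      · exact h
    exact ih _ flag (fun q hq => hj q (by simp [hq])) hset

theorem pv_outer_zero (hn Cn : Nat) :
    ∀ (is : List Int), pvOuter (List.replicate hn (List.replicate Cn 0)) 0 hn is none = "POSSIBLE" := by
  intro is
  induction is with
  | nil => rfl
  | cons i is ih =>
    simp only [pvOuter, Option.getD_none]
    obtain ⟨c', heq, _⟩ := pv_inner_zero hn Cn i (PySem.List.pyRange 0 (hn : Int) 1)
      (List.replicate hn 0) true
      (fun j hj => ((PySem.List.mem_pyRange_one).mp hj).1)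
      (fun x hx => List.eq_of_mem_replicate hx)
    rw [heq]
    simpa using ih

-- ===== VERDICT (by name: the statement is the Claim_ definition above) =====
theorem pv_zip_self {α β : Type} (f : α → β) :
    ∀ (l : List α), (l.map f).zip l = l.map (fun a => (f a, a))
  | [] => rfl
  | a :: t => by simp only [List.map_cons, List.zip_cons_cons, pv_zip_self f t]

theorem f_spec : Claim_equal_f := by
  intro lines R C H V _hdom hpre
  obtain ⟨hH, hV, _hchips⟩ := hpre
  unfold Spec_f f f_alt
  simp only [pv_sum_eq]
  set n := (lines.map (fun line => (line.toList.countP (fun c => c == '@') : Int))).sum with hns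
  have hpieces : 0 < (H + 1) * (V + 1) := mul_pos (by omega) (by omega)
  have hnn : 0 ≤ n := by
    apply List.sum_nonneg
    intro x hx
    obtain ⟨l, _, rfl⟩ := List.mem_map.mp hx
    positivity
  have hmnn := PySem.Int.mod_nonneg n hpieces
  by_cases hm0 : PySem.Int.mod n ((H + 1) * (V + 1)) = 0
  · rw [if_neg (by omega), if_neg (by simp [hm0])]
    by_cases hzero : n = 0
    · rw [if_pos hzero]
      -- no chip anywhere: the whole pipeline of A degenerates to POSSIBLE
      have hnolines : ∀ l ∈ lines, '@' ∉ l.toList := by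
        intro l hl
        have hall : ∀ x ∈ lines.map (fun line => (line.toList.countP (fun c => c == '@') : Int)),
            x = 0 := by
          intro x hx
          obtain ⟨l', _, rfl⟩ := List.mem_map.mp hx
          have h1 : 0 ≤ (l'.toList.countP (fun c => c == '@') : Int) := by positivity
          have h2 : (lines.map (fun line => (line.toList.countP (fun c => c == '@') : Int))).sum = 0 := by
            rw [← hns]; exact hzero
          -- a non-negative summand of a zero sum of non-negative terms is zero
          by_contra hne
          have hlt : 0 < (l'.toList.countP (fun c => c == '@') : Int) := lt_of_le_of_ne h1 (Ne.symm hne)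
          have := List.single_le_sum (fun y hy => by
            obtain ⟨l'', _, rfl⟩ := List.mem_map.mp hy
            positivity) _ hx
          omega
        have := hall _ (List.mem_map_of_mem hl)
        intro hmem
        have : l.toList.countP (fun c => c == '@') = 0 := by exact_mod_cast this
        rw [List.countP_eq_zero] at this
        simpa using this '@' hmem
      have hn2 : PySem.Int.floordiv n ((H + 1) * (V + 1)) = 0 := by
        rw [hzero]
        have := (pv_fdiv_mod_of_bounds ((H + 1) * (V + 1)) 0 0 hpieces le_rfl hpieces).1
        simpa using this
      rw [hzero, hn2] at *
      simp only [zero_mul]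
      rw [pv_loop1_zero R lines _ 0 hnolines]
      exact pv_outer_zero (H + 1).toNat C.toNat (PySem.List.pyRange 0 C 1)
    · rw [if_neg hzero]
      have hnpos : 0 < n := lt_of_le_of_ne hnn (Ne.symm hzero)
      have hn2pos : 0 < PySem.Int.floordiv n ((H + 1) * (V + 1)) := by
        have hfm := PySem.Int.floordiv_mul_add_mod n ((H + 1) * (V + 1))
        rw [hm0, add_zero] at hfm
        nlinarith
      set n2 := PySem.Int.floordiv n ((H + 1) * (V + 1)) with hn2s
      have hb : 0 < n2 * (V + 1) := mul_pos hn2pos (by omega)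
      -- phase 1: A's loop equals B's loop, on the same grid
      have h1 := pv_build_eq_loop1 (n2 * (V + 1)) R hb lines 0 0
        (List.replicate (H + 1).toNat (List.replicate C.toNat (0 : Int))) le_rfl hb
      simp only [zero_mul, zero_add] at h1
      rw [h1]
      have hzipmap : (lines.map (fun l => ((l.toList.countP (fun c => c == '@') : Nat) : Int))).zip lines
          = lines.map (fun l => (((l.toList.countP (fun c => c == '@') : Nat) : Int), l)) :=
        pv_zip_self _ lines
      rw [hzipmap]
      rcases hbuild : pvBuild (n2 * (V + 1)) R
          (lines.map (fun l => (((l.toList.countP (fun c => c == '@') : Nat) : Int), l))) 0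
          (List.replicate (H + 1).toNat (List.replicate C.toNat (0 : Int))) with _ | grid
      · rfl
      · show pvOuter grid n2 (H + 1).toNat (PySem.List.pyRange 0 C 1) none
            = pvCheck n2 (grid.map pvPrefixRow) (PySem.List.pyRange 0 C 1) 0
        -- grid invariants
        have hok0 : GridOK (H + 1).toNat C.toNat
            (List.replicate (H + 1).toNat (List.replicate C.toNat (0 : Int))) := by
          refine ⟨by simp, ?_⟩
          intro row hrow
          rw [List.eq_of_mem_replicate hrow]
          exact ⟨by simp, fun x hx => by rw [List.eq_of_mem_replicate hx]⟩
        have hok := pv_build_ok (n2 * (V + 1)) R (H + 1).toNat C.toNat _ 0 _ grid hok0 hbuild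
        have hlen : grid.length = (H + 1).toNat := hok.1
        have hne : grid ≠ [] := by
          intro h
          rw [h] at hlen
          simp at hlen
          omega
        -- phase 2: A's sweep equals B's check
        rw [pv_outer_eq grid n2 (H + 1).toNat hlen (PySem.List.pyRange 0 C 1) none
          (List.replicate (H + 1).toNat 0) rfl (by simp)]
        by_cases hC : 0 ≤ C
        · have hCr : (C : Int) = ((C.toNat : Nat) : Int) := by
            rw [Int.toNat_of_nonneg hC]
          rw [show (0 : Int) = ((0 : Nat) : Int) from rfl, hCr]
          have h3 := pv_sweep_eq_check n2 hn2pos grid hne C.toNat (hok.2) (C.toNat - 0) 0 0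
            rfl (by omega) (by
              intro row hrow
              simp only [List.take_zero, List.sum_nil]
              constructor <;> nlinarith)
          simp only [List.take_zero, List.sum_nil, zero_mul, sub_zero, List.map_const', hlen,
            Nat.cast_zero] at h3 ⊢
          exact h3
        · rw [PySem.List.pyRange_one_eq_nil (by omega)]
          simp [pvSweep, pvCheck]
  · rw [if_pos (by omega), if_pos (by simpa using hm0)]
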